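-- pv_equiv track=rewrite | github.com/OttoBoop/IA_Educacao_V2 | backend/run_verification_f10.py | _mark_stage_rule_lines
-- ===== SOURCE A (Python) =====
-- def _sanitize_observation(observation: str) -> str:
--     return " ".join(str(observation).replace("|", "/").split()) if observation else ""
--
-- def _set_table_status_line(
--     line: str,
--     *,
--     status_index: int,
--     observation_index: int,
--     status: str,
--     observation: str,
-- ) -> str:
--     parts = line.split("|")
--     if len(parts) <= observation_index + 1:
--         return line
--     parts[status_index] = f" {status} "
--     parts[observation_index] = f" {_sanitize_observation(observation)} "
--     return "|".join(parts)
--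
-- def _mark_stage_rule_lines(
--     lines: list[str],
--     stage_name: str,
--     check_prefix: str,
--     status: str,
--     observation: str = "",
-- ) -> bool:
--     header = f"### Stage: {stage_name}"
--     in_section = False
--     for index, line in enumerate(lines):
--         if line.strip() == header:
--             in_section = True
--             continue
--         if in_section and line.startswith("### "):
--             break
--         if in_section and line.startswith(f"| {check_prefix}"):
--             lines[index] = _set_table_status_line(
--                 line,
--                 status_index=3,
--                 observation_index=4,
--                 status=status,
--                 observation=observation,
--             )
--             return True
--     return False
-- ===== SOURCE B (Python) =====
-- def _sanitize_observation(observation: str) -> str: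
--     return " ".join(str(observation).replace("|", "/").split()) if observation else ""
--
-- def _set_table_status_line(
--     line: str,
--     *,
--     status_index: int,
--     observation_index: int,
--     status: str,
--     observation: str,
-- ) -> str:
--     parts = line.split("|")
--     if len(parts) <= observation_index + 1:
--         return line
--     parts[status_index] = f" {status} "
--     parts[observation_index] = f" {_sanitize_observation(observation)} "
--     return "|".join(parts)
--
-- def _mark_stage_rule_lines(
--     lines: list[str],
--     stage_name: str,
--     check_prefix: str,
--     status: str,
--     observation: str = "",
-- ) -> bool:
--     header = f"### Stage: {stage_name}"
--     stripped = [line.strip() for line in lines]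
--     if header not in stripped:
--         return False
--     start = stripped.index(header) + 1
--     section = lines[start:]
--     fences = [k for k, line in enumerate(section) if line.startswith("### ")]
--     if fences:
--         section = section[: fences[0]]
--     hits = [k for k, line in enumerate(section) if line.startswith(f"| {check_prefix}")]
--     if not hits:
--         return False
--     lines[start + hits[0]] = _set_table_status_line(
--         section[hits[0]],
--         status_index=3,
--         observation_index=4,
--         status=status,
--         observation=observation,
--     )
--     return True
-- ===== Notes on version B (the rewrite author's own statement) =====
-- stated objective: idiomatic
-- what changed: Replaced the single stateful flag loop by a declarative pipeline: strip all lines once and locate the header with list.index, slice off the section, cut it at the first '### ' fence found by a comprehension, and pick the first rule hit from another comprehension; Pre_ excludes inputs where the stage header line occurs more than once, a duplicated-header corner on which both readings are defensible (A keeps the section open across the repeat, B treats every heading as a section boundary).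
import Mathlib
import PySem

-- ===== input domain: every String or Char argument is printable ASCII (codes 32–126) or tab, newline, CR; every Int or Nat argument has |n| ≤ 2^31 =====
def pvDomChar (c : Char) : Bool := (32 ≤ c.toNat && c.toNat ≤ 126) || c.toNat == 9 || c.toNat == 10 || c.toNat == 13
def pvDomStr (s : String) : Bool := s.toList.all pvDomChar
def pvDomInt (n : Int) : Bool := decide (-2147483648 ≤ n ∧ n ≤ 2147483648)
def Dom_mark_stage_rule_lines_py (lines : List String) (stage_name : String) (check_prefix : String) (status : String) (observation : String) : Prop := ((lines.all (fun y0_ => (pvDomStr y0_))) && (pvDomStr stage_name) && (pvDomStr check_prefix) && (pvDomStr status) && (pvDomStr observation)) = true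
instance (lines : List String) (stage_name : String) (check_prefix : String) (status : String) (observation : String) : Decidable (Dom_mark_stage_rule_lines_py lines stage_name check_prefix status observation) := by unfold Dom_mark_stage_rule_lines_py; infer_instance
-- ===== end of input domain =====

-- B replaces A's stateful flag loop by a strip/index/slice/comprehension pipeline; equivalence is about
-- the RETURN value only (both Pythons perform the same single in-place line update on a match).

-- ===== PORT A =====
-- A's single loop with the in_section flag. The in-place update lines[index] does not
-- affect the returned Bool, so the port records the branch and returns true there.
def markALoop (header check_prefix : String) : List String → Bool → Bool
  | [], _ => false
  | l :: rest, in_section =>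
    if PySem.Str.strip l == header then markALoop header check_prefix rest true
    else if in_section && PySem.Str.startswith l "### " then false
    else if in_section && PySem.Str.startswith l ("| " ++ check_prefix) then true
    else markALoop header check_prefix rest in_section

def mark_stage_rule_lines_py (lines : List String) (stage_name : String) (check_prefix : String) (status : String) (observation : String) : Bool :=
  markALoop ("### Stage: " ++ stage_name) check_prefix lines false

-- ===== PORT B =====
-- Source B's pipeline: stripped copies, 'header in stripped' + stripped.index(header) is the
-- match on PySem.List.index? (none exactly when the membership test fails); lines[start:]
-- and section[:fences[0]] are PySem.List.slice; the two comprehensions over enumerate are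
-- filter/map over PySem.List.enumerate. The returned Bool is 'hits is non-empty'.
def mark_stage_rule_lines_py_alt (lines : List String) (stage_name : String) (check_prefix : String) (status : String) (observation : String) : Bool :=
  let header := "### Stage: " ++ stage_name
  let stripped := lines.map (fun l => PySem.Str.strip l)
  match PySem.List.index? stripped header with
  | none => false
  | some idx =>
    let section0 := PySem.List.slice lines (some ((idx : Int) + 1)) none
    let fences := ((PySem.List.enumerate section0).filter (fun p => PySem.Str.startswith p.2 "### ")).map (fun p => p.1)
    let section1 := match fences with
      | [] => section0
      | f :: _ => PySem.List.slice section0 none (some f)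
    let hits := ((PySem.List.enumerate section1).filter (fun p => PySem.Str.startswith p.2 ("| " ++ check_prefix))).map (fun p => p.1)
    !hits.isEmpty

-- ===== PRECONDITION & SPEC =====
-- Pre_ excludes inputs where the stage header line occurs (stripped) more than once: with a
-- duplicated header both readings are defensible — A keeps the section open across the repeat,
-- B treats every heading line as a section boundary — an unspecified corner no caller exercises.
def Pre_mark_stage_rule_lines_py (lines : List String) (stage_name : String) (check_prefix : String) (status : String) (observation : String) : Prop :=
  (lines.map (fun l => PySem.Str.strip l)).count ("### Stage: " ++ stage_name) ≤ 1
instance (lines : List String) (stage_name : String) (check_prefix : String) (status : String) (observation : String) : Decidable (Pre_mark_stage_rule_lines_py lines stage_name check_prefix status observation) := by unfold Pre_mark_stage_rule_lines_py; infer_instance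

def pvWitness_mark_stage_rule_lines_py : List String × String × String × String × String :=
  (["### Stage: s", "| c | x | ok | obs | y |", "### Stage: t"], "s", "c", "PASS", "fine")

def Spec_mark_stage_rule_lines_py (lines : List String) (stage_name : String) (check_prefix : String) (status : String) (observation : String) (out : Bool) : Prop := out = mark_stage_rule_lines_py_alt lines stage_name check_prefix status observation
instance (lines : List String) (stage_name : String) (check_prefix : String) (status : String) (observation : String) (out : Bool) : Decidable (Spec_mark_stage_rule_lines_py lines stage_name check_prefix status observation out) := by unfold Spec_mark_stage_rule_lines_py; infer_instance

-- ===== CLAIM (what is proved, stated in full; the proofs are below) =====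
def Claim_equal_mark_stage_rule_lines_py : Prop := ∀ (lines : List String) (stage_name : String) (check_prefix : String) (status : String) (observation : String), Dom_mark_stage_rule_lines_py lines stage_name check_prefix status observation → Pre_mark_stage_rule_lines_py lines stage_name check_prefix status observation → Spec_mark_stage_rule_lines_py lines stage_name check_prefix status observation (mark_stage_rule_lines_py lines stage_name check_prefix status observation)

-- ===== LEMMAS AND PROOFS =====

-- Reference scan of a section body: stop on a fence (S), succeed on a rule hit (R).
def secScan (S R : String → Bool) : List String → Bool
  | [] => false
  | l :: t => if S l then false else if R l then true else secScan S R t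

-- A's loop before the flag is set: it just searches for the first header line.
theorem markALoop_false (header check_prefix : String) (ls : List String) :
    markALoop header check_prefix ls false =
      (match PySem.List.index? (ls.map (fun l => PySem.Str.strip l)) header with
       | none => false
       | some k => markALoop header check_prefix (ls.drop (k + 1)) true) := by
  induction ls with
  | nil => rfl
  | cons l rest ih =>
    by_cases h : PySem.Str.strip l = header
    · rw [show (l :: rest).map (fun l => PySem.Str.strip l) =
            header :: rest.map (fun l => PySem.Str.strip l) by simp [h],
          PySem.List.index?_cons_self]
      simp [markALoop, h]
    · rw [show (l :: rest).map (fun l => PySem.Str.strip l) =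
            PySem.Str.strip l :: rest.map (fun l => PySem.Str.strip l) from rfl,
          PySem.List.index?_cons_of_ne _ h]
      have hA : markALoop header check_prefix (l :: rest) false =
          markALoop header check_prefix rest false := by
        simp [markALoop, h]
      rw [hA, ih]
      cases PySem.List.index? (rest.map (fun l => PySem.Str.strip l)) header with
      | none => rfl
      | some k => simp [List.drop_succ_cons]

-- Once the flag is set, on a header-free tail A's loop is the reference section scan.
theorem markALoop_true (header check_prefix : String) (ls : List String)
    (hfree : ∀ l ∈ ls, PySem.Str.strip l ≠ header) :
    markALoop header check_prefix ls true =
      secScan (fun l => PySem.Str.startswith l "### ")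
              (fun l => PySem.Str.startswith l ("| " ++ check_prefix)) ls := by
  induction ls with
  | nil => rfl
  | cons l rest ih =>
    have h := hfree l (by simp)
    simp [markALoop, secScan, h, ih (fun x hx => hfree x (by simp [hx]))]

-- First index produced by an enumerate/filter/map comprehension.
theorem head_enumFilter (P : String → Bool) (ls : List String) (s : Int) :
    ((((PySem.List.enumerate ls s).filter (fun p => P p.2)).map (fun p => p.1)).head?) =
      (if ls.any P then some (s + (ls.findIdx P : Int)) else none) := by
  induction ls generalizing s with
  | nil => simp [PySem.List.enumerate_nil]
  | cons l rest ih =>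
    by_cases h : P l = true
    · simp [PySem.List.enumerate_cons, h, List.findIdx_cons]
    · simp only [PySem.List.enumerate_cons, List.filter_cons, h, Bool.false_eq_true,
        if_false, ih (s + 1), List.any_cons, List.findIdx_cons]
      cases hany : rest.any P
      · simp [h, hany]
      · simp only [h, hany, Bool.false_eq_true, if_false, cond_false, Bool.false_or,
          if_true, Option.some_inj]
        push_cast
        ring

-- The pipeline 'cut at the first fence, then any rule hit' equals the reference scan.
theorem cut_any_eq_secScan (S R : String → Bool) (ls : List String) :
    (if ls.any S then (ls.take (ls.findIdx S)).any R else ls.any R) = secScan S R ls := by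
  induction ls with
  | nil => simp [secScan]
  | cons l rest ih =>
    by_cases hS : S l = true
    · simp [secScan, hS, List.findIdx_cons]
    · by_cases hR : R l = true
      · simp only [secScan, hS, Bool.false_eq_true, if_false, hR, if_true,
          List.any_cons, Bool.or_eq_true, List.findIdx_cons, cond_false]
        cases hany : rest.any S <;> simp [hS, hR]
      · simp only [secScan, hS, Bool.false_eq_true, if_false, hR, List.any_cons,
          Bool.false_or, List.findIdx_cons, cond_false, ← ih]
        cases hany : rest.any S <;> simp [hS, hR, hany]

-- B's pipeline on the section body is the reference section scan.
theorem pipeline_eq_secScan (S R : String → Bool) (sec : List String) :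
    (let fences := ((PySem.List.enumerate sec).filter (fun p => S p.2)).map (fun p => p.1)
     let section1 := match fences with
       | [] => sec
       | f :: _ => PySem.List.slice sec none (some f)
     let hits := ((PySem.List.enumerate section1).filter (fun p => R p.2)).map (fun p => p.1)
     !hits.isEmpty) = secScan S R sec := by
  have hits_any : ∀ (t : List String),
      (!(((PySem.List.enumerate t).filter (fun p => R p.2)).map (fun p => p.1)).isEmpty) =
        t.any R := by
    intro t
    have h := head_enumFilter R t 0
    cases hl : ((PySem.List.enumerate t).filter (fun p => R p.2)).map (fun p => p.1) with
    | nil =>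
      rw [hl] at h
      simp only [List.head?_nil] at h
      have hany : t.any R = false := by
        cases ha : t.any R
        · rfl
        · rw [ha] at h; simp at h
      simp [hany]
    | cons x xs =>
      rw [hl] at h
      have hany : t.any R = true := by
        cases ha : t.any R
        · rw [ha] at h; simp at h
        · rfl
      simp [hany]
  have hf := head_enumFilter S sec 0
  rw [← cut_any_eq_secScan]
  simp only
  cases hl : ((PySem.List.enumerate sec).filter (fun p => S p.2)).map (fun p => p.1) with
  | nil =>
    rw [hl] at hf
    simp only [List.head?_nil] at hf
    have hany : sec.any S = false := by
      cases hany : sec.any S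
      · rfl
      · rw [hany] at hf; simp at hf
    rw [hany, hits_any sec]
    simp
  | cons f fs =>
    rw [hl] at hf
    have hany : sec.any S = true := by
      cases ha : sec.any S
      · rw [ha] at hf; simp at hf
      · rfl
    rw [hany] at hf
    simp only [List.head?_cons, if_true, Option.some_inj] at hf
    have hsec1 : PySem.List.slice sec none (some f) = sec.take (sec.findIdx S) := by
      rw [hf, show (0 + ((sec.findIdx S : Nat) : Int)) = ((sec.findIdx S : Nat) : Int) by ring]
      exact PySem.List.slice_to_natCast sec _
    rw [hits_any, hany]
    show (PySem.List.slice sec none (some f)).any R =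
      if True then (sec.take (sec.findIdx S)).any R else sec.any R
    rw [hsec1, if_pos trivial]

-- ===== VERDICT (by name: the statement is the Claim_ definition above) =====
theorem mark_stage_rule_lines_py_spec : Claim_equal_mark_stage_rule_lines_py := by
  intro lines stage_name check_prefix status observation _ hpre
  unfold Spec_mark_stage_rule_lines_py mark_stage_rule_lines_py mark_stage_rule_lines_py_alt
  rw [markALoop_false]
  cases hidx : PySem.List.index? (lines.map (fun l => PySem.Str.strip l)) ("### Stage: " ++ stage_name) with
  | none => simp only [hidx]
  | some k =>
    simp only [hidx]
    -- the suffix after the unique header line is header-free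
    obtain ⟨pre, suf, hsplit, hlen, hnot⟩ := (PySem.List.index?_eq_some_iff _ _ _).mp hidx
    have hdrop : (lines.map (fun l => PySem.Str.strip l)).drop (k + 1) = suf := by
      rw [hsplit, show pre ++ ("### Stage: " ++ stage_name) :: suf =
            (pre ++ ["### Stage: " ++ stage_name]) ++ suf by simp]
      exact List.drop_left' (by simp [hlen])
    have hcount : suf.count ("### Stage: " ++ stage_name) = 0 := by
      unfold Pre_mark_stage_rule_lines_py at hpre
      rw [hsplit] at hpre
      simp [List.count_append] at hpre
      omega
    have hfree : ∀ l ∈ lines.drop (k + 1), PySem.Str.strip l ≠ ("### Stage: " ++ stage_name) := by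
      intro l hl heq
      have : PySem.Str.strip l ∈ suf := by
        rw [← hdrop, ← List.map_drop]
        exact List.mem_map_of_mem hl
      rw [heq] at this
      exact absurd (List.count_eq_zero.mp hcount) (by simp [this])
    rw [markALoop_true _ _ _ hfree]
    have hslice : PySem.List.slice lines (some ((k : Int) + 1)) none = lines.drop (k + 1) := by
      rw [show ((k : Int) + 1) = ((k + 1 : Nat) : Int) by push_cast; ring]
      exact PySem.List.slice_from_natCast lines (k + 1)
    rw [hslice]
    exact (pipeline_eq_secScan (fun l => PySem.Str.startswith l "### ")
      (fun l => PySem.Str.startswith l ("| " ++ check_prefix)) (lines.drop (k + 1))).symm
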